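-- pv_equiv track=rewrite | github.com/gamboy45/CAPSTONEPROJECT | IT-Project-H-A-R-D--Core-master/IT-Project-H-A-R-D--Core-master/Front_End_Code/flaskapp/pageGeneration.py | sortRelative
-- ===== SOURCE A (Python) =====
-- def sortRelative(list):
-- 	output = []
-- 	parents = 0
-- 	children = 0
-- 	spouse = False
-- 	for i in range(4):
-- 		for relative in list:
-- 			if i == 0 and relative[0] == 'child':
-- 				output.append(relative)
-- 				parents += 1
-- 			elif i == 1 and relative[0] == 'spouse':
-- 				output.append(relative)
-- 				output.append(("self", "self"))
-- 				spouse = True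
-- 			elif i == 2  and (relative[0] == 'brother' or relative[0] == 'sister'):
-- 				output.append(relative)
-- 			elif i == 3 and relative[0] == 'parent':
-- 				output.append(relative)
-- 				children += 1
-- 	if not spouse:
-- 		output.insert(parents,("self", "self"))
-- 		output.insert(parents,("nospouse", "nospouse"))
-- 	output.insert(parents, ("linebreak", "linebreak"))
-- 	if parents == 0:
-- 		output.insert(parents, (("noparent", "noparent")))
-- 	if children != 0:
-- 		output.insert(-children, ("linebreak", "linebreak"))
--
-- 	return output
-- ===== SOURCE B (Python) =====
-- def sortRelative(list):
--     kids, spouses, sibs, pars = [], [], [], []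
--     for r in list:
--         k = r[0]
--         if k == 'child':
--             kids.append(r)
--         elif k == 'spouse':
--             spouses.append(r)
--             spouses.append(("self", "self"))
--         elif k == 'brother' or k == 'sister':
--             sibs.append(r)
--         elif k == 'parent':
--             pars.append(r)
--     head = [] if kids else [("noparent", "noparent")]
--     mid = spouses if spouses else [("nospouse", "nospouse"), ("self", "self")]
--     tail = ([("linebreak", "linebreak")] + pars) if pars else []
--     return head + kids + [("linebreak", "linebreak")] + mid + sibs + tail
-- ===== Notes on version B (the rewrite author's own statement) =====
-- stated objective: simpler
-- what changed: A makes four full index-guarded passes over the list and then patches the result with positional list.insert calls (including a negative index); B categorizes each relative once into four buckets and returns one direct concatenation of head/kids/linebreak/spouse-block/siblings/tail with no positional inserts.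
import Mathlib
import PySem

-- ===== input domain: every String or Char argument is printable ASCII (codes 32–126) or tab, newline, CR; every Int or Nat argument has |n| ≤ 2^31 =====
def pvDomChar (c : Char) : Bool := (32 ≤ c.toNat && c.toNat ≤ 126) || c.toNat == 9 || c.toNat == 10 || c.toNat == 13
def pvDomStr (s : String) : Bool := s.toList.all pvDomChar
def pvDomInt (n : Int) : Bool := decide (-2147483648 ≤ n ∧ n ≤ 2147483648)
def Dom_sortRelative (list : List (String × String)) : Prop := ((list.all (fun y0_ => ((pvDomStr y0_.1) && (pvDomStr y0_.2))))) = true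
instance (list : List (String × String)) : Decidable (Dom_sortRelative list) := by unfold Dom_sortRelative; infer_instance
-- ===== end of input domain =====

-- B replaces A's four index-guarded passes by one categorizing pass into four buckets
-- plus a direct concatenation (objective: simpler).

-- ===== PORT A =====
-- A's loop body: the four i-guarded branches, on state (output, parents, children, spouse).
def aStep (i : Int) (st : List (String × String) × Int × Int × Bool) (r : String × String) :
    List (String × String) × Int × Int × Bool :=
  match st with
  | (output, parents, children, spouse) =>
    if i == 0 && r.1 == "child" then (output ++ [r], parents + 1, children, spouse)
    else if i == 1 && r.1 == "spouse" then (output ++ [r, ("self", "self")], parents, children, true)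
    else if i == 2 && (r.1 == "brother" || r.1 == "sister") then (output ++ [r], parents, children, spouse)
    else if i == 3 && r.1 == "parent" then (output ++ [r], parents, children + 1, spouse)
    else (output, parents, children, spouse)

def sortRelative (list : List (String × String)) : List (String × String) :=
  match (PySem.List.pyRange 0 4 1).foldl (fun st i => list.foldl (aStep i) st)
      (([] : List (String × String)), (0 : Int), (0 : Int), false) with
  | (output, parents, children, spouse) =>
    let output := if !spouse then
        PySem.List.insert (PySem.List.insert output parents ("self", "self")) parents ("nospouse", "nospouse")
      else output
    let output := PySem.List.insert output parents ("linebreak", "linebreak")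
    let output := if parents == 0 then PySem.List.insert output parents ("noparent", "noparent") else output
    if children != 0 then PySem.List.insert output (-children) ("linebreak", "linebreak") else output

-- ===== PORT B =====
-- B's loop body: distribute one relative into the four buckets (kids, spouses, sibs, pars).
def bStep (b : List (String × String) × List (String × String) × List (String × String) × List (String × String))
    (r : String × String) :
    List (String × String) × List (String × String) × List (String × String) × List (String × String) :=
  match b with
  | (kids, spouses, sibs, pars) =>
    if r.1 == "child" then (kids ++ [r], spouses, sibs, pars)
    else if r.1 == "spouse" then (kids, spouses ++ [r, ("self", "self")], sibs, pars)
    else if r.1 == "brother" || r.1 == "sister" then (kids, spouses, sibs ++ [r], pars)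
    else if r.1 == "parent" then (kids, spouses, sibs, pars ++ [r])
    else (kids, spouses, sibs, pars)

def sortRelative_alt (list : List (String × String)) : List (String × String) :=
  match list.foldl bStep ([], [], [], []) with
  | (kids, spouses, sibs, pars) =>
    let head := if kids.isEmpty then [("noparent", "noparent")] else []
    let mid := if spouses.isEmpty then [("nospouse", "nospouse"), ("self", "self")] else spouses
    let tail := if pars.isEmpty then [] else ("linebreak", "linebreak") :: pars
    head ++ kids ++ ("linebreak", "linebreak") :: mid ++ sibs ++ tail

-- ===== PRECONDITION & SPEC =====
def Spec_sortRelative (list : List (String × String)) (out : List (String × String)) : Prop := out = sortRelative_alt list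
instance (list : List (String × String)) (out : List (String × String)) : Decidable (Spec_sortRelative list out) := by unfold Spec_sortRelative; infer_instance

-- ===== CLAIM (what is proved, stated in full; the proofs are below) =====
def Claim_equal_sortRelative : Prop := ∀ (list : List (String × String)), Dom_sortRelative list → Spec_sortRelative list (sortRelative list)

-- ===== LEMMAS AND PROOFS =====
def kidsOf (l : List (String × String)) : List (String × String) := l.filter (fun r => r.1 == "child")
def spsOf (l : List (String × String)) : List (String × String) :=
  l.flatMap (fun r => if r.1 == "spouse" then [r, ("self", "self")] else [])
def sibsOf (l : List (String × String)) : List (String × String) :=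
  l.filter (fun r => r.1 == "brother" || r.1 == "sister")
def parsOf (l : List (String × String)) : List (String × String) := l.filter (fun r => r.1 == "parent")

theorem bFold (l : List (String × String)) (k s b p : List (String × String)) :
    l.foldl bStep (k, s, b, p) = (k ++ kidsOf l, s ++ spsOf l, b ++ sibsOf l, p ++ parsOf l) := by
  induction l generalizing k s b p with
  | nil => simp [kidsOf, spsOf, sibsOf, parsOf]
  | cons r t ih =>
    simp only [List.foldl_cons, bStep]
    by_cases h1 : r.1 = "child" <;> by_cases h2 : r.1 = "spouse" <;>
      by_cases h3 : r.1 = "brother" ∨ r.1 = "sister" <;> by_cases h4 : r.1 = "parent" <;>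
      simp_all [kidsOf, spsOf, sibsOf, parsOf]

theorem pass0 (l : List (String × String)) (out : List (String × String)) (p c : Int) (s : Bool) :
    l.foldl (aStep 0) (out, p, c, s) = (out ++ kidsOf l, p + ((kidsOf l).length : Int), c, s) := by
  induction l generalizing out p with
  | nil => simp [kidsOf]
  | cons r t ih =>
    simp only [List.foldl_cons]
    by_cases h1 : r.1 = "child"
    · rw [show aStep 0 (out, p, c, s) r = (out ++ [r], p + 1, c, s) from by simp [aStep, h1]]
      rw [ih]
      simp [kidsOf, h1]
      ring
    · rw [show aStep 0 (out, p, c, s) r = (out, p, c, s) from by simp [aStep, h1]]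
      rw [ih]
      simp [kidsOf, h1]

theorem pass1 (l : List (String × String)) (out : List (String × String)) (p c : Int) (s : Bool) :
    l.foldl (aStep 1) (out, p, c, s) = (out ++ spsOf l, p, c, s || l.any (fun r => r.1 == "spouse")) := by
  induction l generalizing out s with
  | nil => simp [spsOf]
  | cons r t ih =>
    simp only [List.foldl_cons]
    by_cases h1 : r.1 = "spouse"
    · rw [show aStep 1 (out, p, c, s) r = (out ++ [r, ("self", "self")], p, c, true) from by
        simp [aStep, h1]]
      rw [ih]
      simp [spsOf, h1]
    · rw [show aStep 1 (out, p, c, s) r = (out, p, c, s) from by simp [aStep, h1]]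
      rw [ih]
      have hb : (r.1 == "spouse") = false := beq_eq_false_iff_ne.mpr h1
      simp [spsOf, h1, hb]

theorem pass2 (l : List (String × String)) (out : List (String × String)) (p c : Int) (s : Bool) :
    l.foldl (aStep 2) (out, p, c, s) = (out ++ sibsOf l, p, c, s) := by
  induction l generalizing out with
  | nil => simp [sibsOf]
  | cons r t ih =>
    simp only [List.foldl_cons]
    by_cases h1 : r.1 = "brother" ∨ r.1 = "sister"
    · rw [show aStep 2 (out, p, c, s) r = (out ++ [r], p, c, s) from by
        rcases h1 with h1 | h1 <;> simp [aStep, h1]]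
      rw [ih]
      have : (r.1 == "brother" || r.1 == "sister") = true := by
        rcases h1 with h1 | h1 <;> simp [h1]
      simp [sibsOf, this]
    · have h2 : ¬r.1 = "brother" := fun h => h1 (Or.inl h)
      have h3 : ¬r.1 = "sister" := fun h => h1 (Or.inr h)
      rw [show aStep 2 (out, p, c, s) r = (out, p, c, s) from by simp [aStep, h2, h3]]
      rw [ih]
      simp [sibsOf, h2, h3]

theorem pass3 (l : List (String × String)) (out : List (String × String)) (p c : Int) (s : Bool) :
    l.foldl (aStep 3) (out, p, c, s) = (out ++ parsOf l, p, c + ((parsOf l).length : Int), s) := by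
  induction l generalizing out c with
  | nil => simp [parsOf]
  | cons r t ih =>
    simp only [List.foldl_cons]
    by_cases h1 : r.1 = "parent"
    · rw [show aStep 3 (out, p, c, s) r = (out ++ [r], p, c + 1, s) from by simp [aStep, h1]]
      rw [ih]
      simp [parsOf, h1]
      ring
    · rw [show aStep 3 (out, p, c, s) r = (out, p, c, s) from by simp [aStep, h1]]
      rw [ih]
      simp [parsOf, h1]

theorem sps_empty_iff (l : List (String × String)) :
    spsOf l = [] ↔ l.any (fun r => r.1 == "spouse") = false := by
  induction l with
  | nil => simp [spsOf]
  | cons r t ih =>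
    by_cases h : r.1 = "spouse" <;> simp_all [spsOf]

theorem insert_len_append {α : Type} (l1 l2 : List α) (v : α) :
    PySem.List.insert (l1 ++ l2) ((l1.length : Int)) v = l1 ++ v :: l2 := by
  rw [PySem.List.insert_natCast _ _ _ (by simp)]
  simp

theorem insert_neg {α : Type} (l1 l2 : List α) (v : α) (h : l2 ≠ []) :
    PySem.List.insert (l1 ++ l2) (-((l2.length : Int))) v = l1 ++ v :: l2 := by
  have hlen : 0 < l2.length := List.length_pos_iff.mpr h
  simp only [PySem.List.insert, PySem.List.sliceIndices]
  have h1 : ¬ ((1 : Int) < 0) := by norm_num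
  simp only [if_neg h1]
  have hneg : (-(l2.length : Int)) < 0 := by omega
  simp only [List.length_append, if_pos hneg]
  have : max (-(l2.length : Int) + ((l1.length : Nat) + l2.length : Nat)) 0 = (l1.length : Int) := by
    push_cast; omega
  rw [this]
  simp

theorem insert_neg_tail {α : Type} (xs P : List α) (v : α) (h : P ≠ []) (l1 : List α)
    (hx : xs = l1 ++ P) : PySem.List.insert xs (-((P.length : Int))) v = l1 ++ v :: P := by
  rw [hx]; exact insert_neg l1 P v h

-- ===== VERDICT (by name: the statement is the Claim_ definition above) =====
theorem sortRelative_spec : Claim_equal_sortRelative := by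
  intro l _
  unfold Spec_sortRelative sortRelative sortRelative_alt
  have hr : PySem.List.pyRange 0 4 1 = [0, 1, 2, 3] := by decide
  rw [hr]
  simp only [List.foldl_cons, List.foldl_nil]
  rw [pass0, pass1, pass2, pass3, bFold]
  simp only [List.nil_append, zero_add, List.append_assoc, Bool.false_or]
  by_cases hS : l.any (fun r => r.1 == "spouse") = false
  · -- no spouse: A inserts self/nospouse; B's mid is the default block
    have hsp : spsOf l = [] := (sps_empty_iff l).mpr hS
    rw [hsp, hS]
    simp only [Bool.not_false, if_pos, List.nil_append, List.isEmpty_nil]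
    rw [insert_len_append, insert_len_append, insert_len_append]
    by_cases hK : kidsOf l = []
    · rw [hK]
      simp only [List.length_nil, Nat.cast_zero, beq_self_eq_true, if_pos, List.nil_append,
        List.isEmpty_nil]
      rw [show PySem.List.insert
            (("linebreak", "linebreak") :: ("nospouse", "nospouse") :: ("self", "self") :: (sibsOf l ++ parsOf l))
            (0 : Int) ("noparent", "noparent")
          = [] ++ ("noparent", "noparent") :: ("linebreak", "linebreak") :: ("nospouse", "nospouse") ::
              ("self", "self") :: (sibsOf l ++ parsOf l) from by
        simpa using insert_len_append ([] : List (String × String)) _ ("noparent", "noparent")]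
      by_cases hP : parsOf l = []
      · simp [hP]
      · rw [if_pos (show (((parsOf l).length : Int) != 0) = true from by
          simp [List.length_eq_zero_iff, hP])]
        rw [insert_neg_tail _ _ _ hP (("noparent", "noparent") :: ("linebreak", "linebreak") ::
          ("nospouse", "nospouse") :: ("self", "self") :: sibsOf l) (by simp)]
        simp [hP]
    · rw [if_neg (show ¬ ((((kidsOf l).length : Int)) == 0) = true from by
        simp [List.length_eq_zero_iff, hK])]
      rw [if_neg (show ¬ ((kidsOf l).isEmpty) = true from by simp [hK])]
      simp only [List.nil_append]
      by_cases hP : parsOf l = []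
      · simp [hP]
      · rw [if_pos (show (((parsOf l).length : Int) != 0) = true from by
          simp [List.length_eq_zero_iff, hP])]
        rw [insert_neg_tail _ _ _ hP (kidsOf l ++ ("linebreak", "linebreak") ::
          ("nospouse", "nospouse") :: ("self", "self") :: sibsOf l) (by simp)]
        simp [hP]
  · -- spouse present: A keeps the interleaved spouse block; B's mid is the spouses bucket
    have hS' : l.any (fun r => r.1 == "spouse") = true := by
      cases h : l.any (fun r => r.1 == "spouse") <;> simp_all
    have hsp : spsOf l ≠ [] := by
      intro h; exact absurd ((sps_empty_iff l).mp h) (by simp [hS'])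
    rw [hS']
    rw [if_neg (show ¬(!true) = true from by simp)]
    rw [if_neg (show ¬ ((spsOf l).isEmpty) = true from by simp [hsp])]
    rw [show kidsOf l ++ (spsOf l ++ (sibsOf l ++ parsOf l))
        = kidsOf l ++ (spsOf l ++ sibsOf l ++ parsOf l) from by simp]
    rw [insert_len_append]
    by_cases hK : kidsOf l = []
    · rw [hK]
      simp only [List.length_nil, Nat.cast_zero, beq_self_eq_true, if_pos, List.nil_append,
        List.isEmpty_nil]
      rw [show PySem.List.insert (("linebreak", "linebreak") :: (spsOf l ++ sibsOf l ++ parsOf l))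
            (0 : Int) ("noparent", "noparent")
          = [] ++ ("noparent", "noparent") :: ("linebreak", "linebreak") :: (spsOf l ++ sibsOf l ++ parsOf l) from by
        simpa using insert_len_append ([] : List (String × String)) _ ("noparent", "noparent")]
      by_cases hP : parsOf l = []
      · simp [hP]
      · rw [if_pos (show (((parsOf l).length : Int) != 0) = true from by
          simp [List.length_eq_zero_iff, hP])]
        rw [insert_neg_tail _ _ _ hP (("noparent", "noparent") :: ("linebreak", "linebreak") ::
          (spsOf l ++ sibsOf l)) (by simp)]
        simp [hP]
    · rw [if_neg (show ¬ ((((kidsOf l).length : Int)) == 0) = true from by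
        simp [List.length_eq_zero_iff, hK])]
      rw [if_neg (show ¬ ((kidsOf l).isEmpty) = true from by simp [hK])]
      simp only [List.nil_append]
      by_cases hP : parsOf l = []
      · simp [hP]
      · rw [if_pos (show (((parsOf l).length : Int) != 0) = true from by
          simp [List.length_eq_zero_iff, hP])]
        rw [insert_neg_tail _ _ _ hP (kidsOf l ++ ("linebreak", "linebreak") ::
          (spsOf l ++ sibsOf l)) (by simp)]
        simp [hP]
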